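-- pv_equiv track=rewrite | github.com/MsZelia/InventOMatic-Parser | inventOMatic-Parser.py | get_legendary_abbr
-- ===== SOURCE A (Python) =====
-- def get_legendary_abbr(item_desc: str, descriptions):
--     effects = 0
--     item_legendary_effects = ''
--     for star in range(3):
--         for legendary_effect in descriptions[star]:
--             if descriptions[star][legendary_effect] in item_desc:
--                 while effects < star:
--                     effects += 1
--                     item_legendary_effects += '/'
--
--                 item_legendary_effects += legendary_effect
--                 break
--     return item_legendary_effects
-- ===== SOURCE B (Python) =====
-- def get_legendary_abbr(item_desc: str, descriptions):
--     # Per-star list of first matching key (None = no match), then trim trailing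
--     # unmatched stars and join with '/'.
--     found = [next((k for k, v in descriptions[star].items() if v in item_desc), None)
--              for star in range(3)]
--     while found and found[-1] is None:
--         found.pop()
--     return '/'.join('' if k is None else k for k in found)
-- ===== Notes on version B (the rewrite author's own statement) =====
-- stated objective: simpler
-- what changed: Replaces the incremental string accumulation with its effects/while slash-counter by building a 3-slot list of first-matching keys (None for no match), trimming trailing unmatched stars and joining with '/'.
import Mathlib
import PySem

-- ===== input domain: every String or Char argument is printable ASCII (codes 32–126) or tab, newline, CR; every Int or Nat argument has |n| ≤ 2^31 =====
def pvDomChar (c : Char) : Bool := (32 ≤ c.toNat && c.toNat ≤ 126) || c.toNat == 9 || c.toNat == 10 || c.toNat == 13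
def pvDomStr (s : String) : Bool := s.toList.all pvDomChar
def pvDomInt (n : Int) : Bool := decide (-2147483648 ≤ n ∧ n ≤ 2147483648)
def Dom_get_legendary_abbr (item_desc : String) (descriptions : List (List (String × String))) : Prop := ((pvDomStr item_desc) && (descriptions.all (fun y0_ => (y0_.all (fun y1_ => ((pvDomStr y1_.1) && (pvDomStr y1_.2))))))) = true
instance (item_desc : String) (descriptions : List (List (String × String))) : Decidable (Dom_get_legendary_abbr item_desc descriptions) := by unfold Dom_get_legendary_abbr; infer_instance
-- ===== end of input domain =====

-- ===== PORT A =====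
-- B changes only the output assembly (per-star slot list joined with '/') for simplicity;
-- the return value is proved equal to A's on all inputs with at least 3 description dicts.
-- while effects < star: effects += 1; item_legendary_effects += '/'
def pvWhileSlash (effects star : Nat) (acc : String) : Nat × String :=
  if effects < star then pvWhileSlash (effects + 1) star (acc ++ "/") else (effects, acc)
termination_by star - effects

-- inner 'for legendary_effect in descriptions[star]: … break'
def pvInnerA (item_desc : String) (d : List (String × String)) (effects star : Nat)
    (acc : String) : Nat × String :=
  match d with
  | [] => (effects, acc)
  | (k, v) :: rest =>
    if PySem.Str.isIn v item_desc then
      let w := pvWhileSlash effects star acc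
      (w.1, w.2 ++ k)
    else pvInnerA item_desc rest effects star acc

def get_legendary_abbr (item_desc : String) (descriptions : List (List (String × String))) : String :=
  -- descriptions[star] for star < 3: getD is exact under Pre_ (3 <= length); below 3 Python raises IndexError
  ((List.range 3).foldl
    (fun st star => pvInnerA item_desc (descriptions.getD star []) st.1 star st.2)
    (0, "")).2

-- ===== PORT B =====
def get_legendary_abbr_alt (item_desc : String) (descriptions : List (List (String × String))) : String :=
  let found := (List.range 3).map (fun star =>
    ((descriptions.getD star []).find? (fun kv => PySem.Str.isIn kv.2 item_desc)).map Prod.fst)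
  -- while found and found[-1] is None: found.pop()
  let trimmed := (found.reverse.dropWhile (fun o => o.isNone)).reverse
  PySem.Str.join "/" (trimmed.map (fun o => o.getD ""))

-- ===== PRECONDITION & SPEC =====
-- Pre_ excludes exactly the inputs where A raises IndexError: fewer than 3 description dicts.
def Pre_get_legendary_abbr (item_desc : String) (descriptions : List (List (String × String))) : Prop :=
  3 <= descriptions.length
instance (item_desc : String) (descriptions : List (List (String × String))) : Decidable (Pre_get_legendary_abbr item_desc descriptions) := by unfold Pre_get_legendary_abbr; infer_instance

def pvWitness_get_legendary_abbr : String × (List (List (String × String))) :=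
  ("a b", [[("A", "a")], [], [("C", "c"), ("D", "b")]])

def Spec_get_legendary_abbr (item_desc : String) (descriptions : List (List (String × String))) (out : String) : Prop := out = get_legendary_abbr_alt item_desc descriptions
instance (item_desc : String) (descriptions : List (List (String × String))) (out : String) : Decidable (Spec_get_legendary_abbr item_desc descriptions out) := by unfold Spec_get_legendary_abbr; infer_instance

-- ===== CLAIM (what is proved, stated in full; the proofs are below) =====
def Claim_equal_get_legendary_abbr : Prop := ∀ (item_desc : String) (descriptions : List (List (String × String))), Dom_get_legendary_abbr item_desc descriptions → Pre_get_legendary_abbr item_desc descriptions → Spec_get_legendary_abbr item_desc descriptions (get_legendary_abbr item_desc descriptions)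

-- ===== LEMMAS AND PROOFS =====
-- A's inner loop is governed by the first matching pair.
theorem pvInnerA_eq_find? (item_desc : String) (d : List (String × String)) (e star : Nat)
    (acc : String) :
    pvInnerA item_desc d e star acc =
      match d.find? (fun kv => PySem.Str.isIn kv.2 item_desc) with
      | none => (e, acc)
      | some kv => ((pvWhileSlash e star acc).1, (pvWhileSlash e star acc).2 ++ kv.1) := by
  induction d with
  | nil => rfl
  | cons kv rest ih =>
    obtain ⟨k, v⟩ := kv
    by_cases h : PySem.Str.isIn v item_desc
    all_goals simp only [PySem.Str.isIn] at h
    · simp [pvInnerA, List.find?, h]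
    · simp [pvInnerA, List.find?, h, ih]

-- ===== VERDICT =====
theorem get_legendary_abbr_spec : Claim_equal_get_legendary_abbr := by
  unfold Claim_equal_get_legendary_abbr
  intro item_desc descriptions _ hpre
  unfold Pre_get_legendary_abbr at hpre
  obtain ⟨d0, d1, d2, rest, rfl⟩ :
      ∃ d0 d1 d2 rest, descriptions = d0 :: d1 :: d2 :: rest := by
    match descriptions, hpre with
    | d0 :: d1 :: d2 :: rest, _ => exact ⟨d0, d1, d2, rest, rfl⟩
  unfold Spec_get_legendary_abbr get_legendary_abbr get_legendary_abbr_alt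
  simp only [List.range_succ, List.range_zero, List.nil_append, List.cons_append,
    List.foldl_cons, List.foldl_nil, List.map_cons, List.map_nil, List.getD,
    List.getElem?_cons_zero, List.getElem?_cons_succ, Option.getD_some,
    pvInnerA_eq_find?]
  rcases h0 : d0.find? (fun kv => PySem.Str.isIn kv.2 item_desc) with _ | ⟨k0, v0⟩ <;>
    rcases h1 : d1.find? (fun kv => PySem.Str.isIn kv.2 item_desc) with _ | ⟨k1, v1⟩ <;>
      rcases h2 : d2.find? (fun kv => PySem.Str.isIn kv.2 item_desc) with _ | ⟨k2, v2⟩ <;>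
    simp only [h0, h1, h2] <;>
    simp [pvWhileSlash, List.dropWhile, PySem.Str.join, PySem.Chars.join, List.intercalate,
      List.intersperse, ← String.toList_inj]
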